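-- pv_equiv track=rewrite | github.com/CodeBoarding/CodeBoarding | static_analyzer/engine/adapters/java_adapter.py | _strip_generics
-- ===== SOURCE A (Python) =====
-- def _strip_generics(param: str) -> str:
--     """Strip generic type parameters: 'List<Animal>' -> 'List'."""
--     result = []
--     depth = 0
--     for ch in param:
--         if ch == "<":
--             depth += 1
--         elif ch == ">":
--             depth -= 1
--         elif depth == 0:
--             result.append(ch)
--     return "".join(result).strip()
-- ===== SOURCE B (Python) =====
-- def _strip_generics(param: str) -> str:
--     """Strip generic type parameters: 'List<Animal>' -> 'List'."""
--     out = []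
--     depth = 0
--     i, n = 0, len(param)
--     while i < n:
--         ch = param[i]
--         if ch == "<":
--             depth += 1
--             i += 1
--         elif ch == ">":
--             depth -= 1
--             i += 1
--         else:
--             j = i + 1
--             while j < n and param[j] != "<" and param[j] != ">":
--                 j += 1
--             if depth == 0:
--                 out.append(param[i:j])
--             i = j
--     return "".join(out).strip()
-- ===== Notes on version B (the rewrite author's own statement) =====
-- stated objective: alternative
-- what changed: Replaces A's per-character depth-counter filter with a segment-jumping scanner: it locates the next bracket, appends each maximal non-bracket run as a single slice when the depth is 0, and only updates the depth at bracket positions.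
import Mathlib
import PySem

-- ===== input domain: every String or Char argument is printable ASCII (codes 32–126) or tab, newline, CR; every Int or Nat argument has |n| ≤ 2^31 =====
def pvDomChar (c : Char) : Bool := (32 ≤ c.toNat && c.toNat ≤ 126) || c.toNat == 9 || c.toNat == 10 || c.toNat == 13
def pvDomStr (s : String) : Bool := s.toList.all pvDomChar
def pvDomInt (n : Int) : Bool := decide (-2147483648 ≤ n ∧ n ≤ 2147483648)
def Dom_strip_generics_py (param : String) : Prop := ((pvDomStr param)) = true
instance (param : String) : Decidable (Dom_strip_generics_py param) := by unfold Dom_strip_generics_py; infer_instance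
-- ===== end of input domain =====

-- B replaces A's per-character depth filter with a segment-jumping scan: at each non-bracket
-- position it scans ahead to the next bracket and appends the whole run as one slice when the
-- depth is 0 (objective: alternative decomposition; same behaviour).

-- ===== PORT A =====
-- loop body: running (result, depth) state, exactly A's branch order
def stripGenLoopA (st : List Char × Int) (ch : Char) : List Char × Int :=
  if ch = '<' then (st.1, st.2 + 1)
  else if ch = '>' then (st.1, st.2 - 1)
  else if st.2 = 0 then (st.1 ++ [ch], st.2)
  else st

def strip_generics_py (param : String) : String :=
  let st := param.toList.foldl stripGenLoopA ([], 0)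
  PySem.Str.strip (String.ofList st.1)

-- ===== PORT B =====
-- B's outer while loop over positions, the remaining characters as a list; the inner
-- 'j' scan to the next bracket is the takeWhile/dropWhile of the non-bracket run
def stripGenGo (cs : List Char) (depth : Int) (acc : List Char) : List Char :=
  match cs with
  | [] => acc
  | c :: rest =>
    if c = '<' then stripGenGo rest (depth + 1) acc
    else if c = '>' then stripGenGo rest (depth - 1) acc
    else
      stripGenGo (rest.dropWhile (fun x => x != '<' && x != '>')) depth
        (if depth = 0 then acc ++ (c :: rest.takeWhile (fun x => x != '<' && x != '>')) else acc)
termination_by cs.length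
decreasing_by
  · simp only [List.length_cons]; omega
  · simp only [List.length_cons]; omega
  · simp only [List.length_cons]
    exact Nat.lt_succ_of_le (List.length_dropWhile_le _ _)

def strip_generics_py_alt (param : String) : String :=
  PySem.Str.strip (String.ofList (stripGenGo param.toList 0 []))

-- ===== PRECONDITION & SPEC =====
def Spec_strip_generics_py (param : String) (out : String) : Prop := out = strip_generics_py_alt param
instance (param : String) (out : String) : Decidable (Spec_strip_generics_py param out) := by unfold Spec_strip_generics_py; infer_instance

-- ===== CLAIM (what is proved, stated in full; the proofs are below) =====
def Claim_equal_strip_generics_py : Prop := ∀ (param : String), Dom_strip_generics_py param → Spec_strip_generics_py param (strip_generics_py param)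

-- ===== LEMMAS AND PROOFS =====
-- per-character reference: the kept characters of cs starting at depth d
def stripGenSpec : List Char → Int → List Char
  | [], _ => []
  | c :: cs, d =>
    if c = '<' then stripGenSpec cs (d + 1)
    else if c = '>' then stripGenSpec cs (d - 1)
    else (if d = 0 then [c] else []) ++ stripGenSpec cs d

-- a maximal non-bracket run is kept (or dropped) wholesale
theorem stripGenSpec_run (cs : List Char) (d : Int) :
    stripGenSpec cs d =
      (if d = 0 then cs.takeWhile (fun x => x != '<' && x != '>') else []) ++
        stripGenSpec (cs.dropWhile (fun x => x != '<' && x != '>')) d := by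
  induction cs with
  | nil => simp [stripGenSpec]
  | cons c cs ih =>
    by_cases h1 : c = '<'
    · simp [stripGenSpec, h1]
    · by_cases h2 : c = '>'
      · simp [stripGenSpec, h2]
      · by_cases h3 : d = 0
        · subst h3; simp [stripGenSpec, h1, h2, ih]
        · simp [stripGenSpec, h1, h2, h3, ih]

-- B's segment scan collects exactly the reference characters
theorem stripGenGo_eq (cs : List Char) (d : Int) (acc : List Char) :
    stripGenGo cs d acc = acc ++ stripGenSpec cs d := by
  induction cs, d, acc using stripGenGo.induct
  case case1 => simp [stripGenGo, stripGenSpec]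
  case case2 => simp_all [stripGenGo, stripGenSpec]
  case case3 => simp_all [stripGenGo, stripGenSpec]
  case case4 d acc c rest h1 h2 ih =>
    rw [stripGenGo, if_neg h1, if_neg h2]
    rw [stripGenSpec, if_neg h1, if_neg h2, stripGenSpec_run rest d]
    by_cases h3 : d = 0 <;> simp_all

-- A's fold collects exactly the reference characters
theorem stripGenFold_eq (cs : List Char) (d : Int) (acc : List Char) :
    (cs.foldl stripGenLoopA (acc, d)).1 = acc ++ stripGenSpec cs d := by
  induction cs generalizing d acc with
  | nil => simp [stripGenSpec]
  | cons c cs ih =>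
    by_cases h1 : c = '<'
    · simp [stripGenLoopA, stripGenSpec, h1, ih]
    · by_cases h2 : c = '>'
      · simp [stripGenLoopA, stripGenSpec, h2, ih]
      · by_cases h3 : d = 0 <;> simp [stripGenLoopA, stripGenSpec, h1, h2, h3, ih]

-- ===== VERDICT (by name: the statement is the Claim_ definition above) =====
theorem strip_generics_py_spec : Claim_equal_strip_generics_py := by
  intro param _
  unfold Spec_strip_generics_py strip_generics_py strip_generics_py_alt
  simp [stripGenFold_eq, stripGenGo_eq]
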